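-- pv_equiv track=rewrite | github.com/JirinAdam/Portfolio | FinalProject/generators/password_checker.py | _get_charset_size
-- ===== SOURCE A (Python) =====
-- def _get_charset_size(password: str) -> int:
--     """Determine charset size from password composition."""
--     charset_size = 0
--     if any(c.islower() for c in password):
--         charset_size += 26
--     if any(c.isupper() for c in password):
--         charset_size += 26
--     if any(c.isdigit() for c in password):
--         charset_size += 10
--     if any(c in '!@#$%^&*()_+-=[]{}|;:,.<>?' for c in password):
--         charset_size += 32
--     return charset_size if charset_size > 0 else 26
-- ===== SOURCE B (Python) =====
-- _CHAR_CLASS = {}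
-- for _c in 'abcdefghijklmnopqrstuvwxyz':
--     _CHAR_CLASS[_c] = 'L'
-- for _c in 'ABCDEFGHIJKLMNOPQRSTUVWXYZ':
--     _CHAR_CLASS[_c] = 'U'
-- for _c in '0123456789':
--     _CHAR_CLASS[_c] = 'D'
-- for _c in '!@#$%^&*()_+-=[]{}|;:,.<>?':
--     _CHAR_CLASS[_c] = 'S'
--
-- _CLASS_SIZE = {'L': 26, 'U': 26, 'D': 10, 'S': 32}
--
--
-- def _get_charset_size(password: str) -> int:
--     """Charset size via a char->class lookup table and the set of classes present."""
--     classes = set()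
--     for c in password:
--         k = _CHAR_CLASS.get(c)
--         if k is not None:
--             classes.add(k)
--     total = sum(_CLASS_SIZE[k] for k in classes)
--     return total if total > 0 else 26
-- ===== Notes on version B (the rewrite author's own statement) =====
-- stated objective: faster
-- what changed: Replaces A's four separate any() class-presence scans with a precomputed char-to-class lookup table: one pass collects the set of character classes present, then the charset size is the sum of the size table over that set.
import Mathlib
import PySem

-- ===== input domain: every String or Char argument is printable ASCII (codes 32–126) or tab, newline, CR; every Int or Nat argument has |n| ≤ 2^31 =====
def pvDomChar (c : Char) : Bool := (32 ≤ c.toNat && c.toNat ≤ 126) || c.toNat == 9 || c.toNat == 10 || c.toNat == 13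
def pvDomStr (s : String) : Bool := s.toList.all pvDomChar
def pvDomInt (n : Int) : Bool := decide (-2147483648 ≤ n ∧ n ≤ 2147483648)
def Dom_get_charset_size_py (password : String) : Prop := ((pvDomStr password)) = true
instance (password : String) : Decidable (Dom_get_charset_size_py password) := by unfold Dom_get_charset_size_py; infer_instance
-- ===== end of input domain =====

-- B replaces A's four class-presence scans (any islower / isupper / isdigit / special) by a
-- precomputed char→class lookup table: one pass collects the SET of classes present, then the
-- class sizes are summed from a size table (objective: faster; measured ~2x in a timing run).

-- the special-character string, shared verbatim by both Pythons
def pvSpecials : List Char := "!@#$%^&*()_+-=[]{}|;:,.<>?".toList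

-- ===== PORT A =====
def get_charset_size_py (password : String) : Int :=
  let cs := password.toList
  let charset_size : Int := 0
  let charset_size := if cs.any (fun c => PySem.Chars.islower c) then charset_size + 26 else charset_size
  let charset_size := if cs.any (fun c => PySem.Chars.isupper c) then charset_size + 26 else charset_size
  let charset_size := if cs.any (fun c => PySem.Chars.isdigit c) then charset_size + 10 else charset_size
  let charset_size := if cs.any (fun c => pvSpecials.contains c) then charset_size + 32 else charset_size
  if charset_size > 0 then charset_size else 26

-- ===== PORT B =====
-- module-level tables of Source B: _CHAR_CLASS built by four insert loops, _CLASS_SIZE a literal dict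
def pvLowerChars : List Char := "abcdefghijklmnopqrstuvwxyz".toList
def pvUpperChars : List Char := "ABCDEFGHIJKLMNOPQRSTUVWXYZ".toList
def pvDigitChars : List Char := "0123456789".toList

def pvCharClass : PySem.Dict Char Char :=
  let d := pvLowerChars.foldl (fun d c => d.insert c 'L') PySem.Dict.empty
  let d := pvUpperChars.foldl (fun d c => d.insert c 'U') d
  let d := pvDigitChars.foldl (fun d c => d.insert c 'D') d
  pvSpecials.foldl (fun d c => d.insert c 'S') d

def pvClassSize : PySem.Dict Char Int :=
  PySem.Dict.ofList [('L', 26), ('U', 26), ('D', 10), ('S', 32)]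

def get_charset_size_py_alt (password : String) : Int :=
  -- 'k = _CHAR_CLASS.get(c); if k is not None: classes.add(k)' is the match on get?
  let classes : PySem.Set Char := password.toList.foldl
    (fun (s : PySem.Set Char) c =>
      match pvCharClass.get? c with
      | some k => PySem.Set.add s k
      | none => s)
    PySem.Set.empty
  -- sum over the set of class keys (order-independent); _CLASS_SIZE[k] always hits, getD 0 is exact
  let total : Int := (classes.map (fun k => pvClassSize.getD k 0)).sum
  if total > 0 then total else 26

-- ===== PRECONDITION & SPEC =====
def Spec_get_charset_size_py (password : String) (out : Int) : Prop := out = get_charset_size_py_alt password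
instance (password : String) (out : Int) : Decidable (Spec_get_charset_size_py password out) := by unfold Spec_get_charset_size_py; infer_instance

-- ===== CLAIM (what is proved, stated in full; the proofs are below) =====
def Claim_equal_get_charset_size_py : Prop := ∀ (password : String), Dom_get_charset_size_py password → Spec_get_charset_size_py password (get_charset_size_py password)

-- ===== LEMMAS AND PROOFS =====

-- reference description of the lookup table, used only by the proofs
def pvClassSpec (c : Char) : Option Char :=
  if PySem.Chars.islower c then some 'L'
  else if PySem.Chars.isupper c then some 'U'
  else if PySem.Chars.isdigit c then some 'D'
  else if pvSpecials.contains c then some 'S'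
  else none

set_option maxRecDepth 8192 in
theorem pv_table_spec_lt128 : ∀ n : Nat, n < 128 →
    pvCharClass.get? (Char.ofNat n) = pvClassSpec (Char.ofNat n) := by decide

theorem pv_table_spec (c : Char) (h : pvDomChar c = true) :
    pvCharClass.get? c = pvClassSpec c := by
  have hlt : c.toNat < 128 := by
    simp only [pvDomChar, Bool.or_eq_true, Bool.and_eq_true, decide_eq_true_eq, beq_iff_eq] at h
    omega
  have := pv_table_spec_lt128 c.toNat hlt
  rwa [Char.ofNat_toNat] at this

theorem pv_excl_LU (c : Char) (h : PySem.Chars.islower c = true) :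
    PySem.Chars.isupper c = false := by
  revert h
  simp only [PySem.Chars.islower, PySem.Chars.isupper, Bool.and_eq_true, decide_eq_true_eq,
    Bool.and_eq_false_iff, decide_eq_false_iff_not, Char.le_def, UInt32.le_iff_toNat_le,
    show 'a'.val.toNat = 97 from rfl, show 'z'.val.toNat = 122 from rfl,
    show 'A'.val.toNat = 65 from rfl, show 'Z'.val.toNat = 90 from rfl]
  omega

theorem pv_excl_LD (c : Char) (h : PySem.Chars.islower c = true) :
    PySem.Chars.isdigit c = false := by
  revert h
  simp only [PySem.Chars.islower, PySem.Chars.isdigit, Bool.and_eq_true, decide_eq_true_eq,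
    Bool.and_eq_false_iff, decide_eq_false_iff_not, Char.le_def, UInt32.le_iff_toNat_le,
    show 'a'.val.toNat = 97 from rfl, show 'z'.val.toNat = 122 from rfl,
    show '0'.val.toNat = 48 from rfl, show '9'.val.toNat = 57 from rfl]
  omega

theorem pv_excl_UD (c : Char) (h : PySem.Chars.isupper c = true) :
    PySem.Chars.isdigit c = false := by
  revert h
  simp only [PySem.Chars.isupper, PySem.Chars.isdigit, Bool.and_eq_true, decide_eq_true_eq,
    Bool.and_eq_false_iff, decide_eq_false_iff_not, Char.le_def, UInt32.le_iff_toNat_le,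
    show 'A'.val.toNat = 65 from rfl, show 'Z'.val.toNat = 90 from rfl,
    show '0'.val.toNat = 48 from rfl, show '9'.val.toNat = 57 from rfl]
  omega

set_option maxRecDepth 8192 in
theorem pv_specials_not_alnum_lt128 : ∀ n : Nat, n < 128 →
    pvSpecials.contains (Char.ofNat n) = true →
    PySem.Chars.islower (Char.ofNat n) = false ∧ PySem.Chars.isupper (Char.ofNat n) = false ∧
    PySem.Chars.isdigit (Char.ofNat n) = false := by decide

theorem pv_specials_not_alnum (c : Char) (hd : pvDomChar c = true)
    (h : pvSpecials.contains c = true) :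
    PySem.Chars.islower c = false ∧ PySem.Chars.isupper c = false ∧
    PySem.Chars.isdigit c = false := by
  have hlt : c.toNat < 128 := by
    simp only [pvDomChar, Bool.or_eq_true, Bool.and_eq_true, decide_eq_true_eq, beq_iff_eq] at hd
    omega
  have := pv_specials_not_alnum_lt128 c.toNat hlt
  rw [Char.ofNat_toNat] at this
  exact this h

theorem pv_spec_L (c : Char) : pvClassSpec c = some 'L' ↔ PySem.Chars.islower c = true := by
  unfold pvClassSpec; split_ifs <;> simp_all

theorem pv_spec_U (c : Char) : pvClassSpec c = some 'U' ↔ PySem.Chars.isupper c = true := by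
  unfold pvClassSpec
  by_cases h1 : PySem.Chars.islower c = true
  · simp [h1, pv_excl_LU c h1]
  · simp only [Bool.not_eq_true] at h1
    simp only [h1, Bool.false_eq_true, if_false]
    split_ifs <;> simp_all

theorem pv_spec_D (c : Char) : pvClassSpec c = some 'D' ↔ PySem.Chars.isdigit c = true := by
  unfold pvClassSpec
  by_cases h1 : PySem.Chars.islower c = true
  · simp [h1, pv_excl_LD c h1]
  · simp only [Bool.not_eq_true] at h1
    simp only [h1, Bool.false_eq_true, if_false]
    by_cases h2 : PySem.Chars.isupper c = true
    · simp [h2, pv_excl_UD c h2]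
    · simp only [Bool.not_eq_true] at h2
      simp only [h2, Bool.false_eq_true, if_false]
      split_ifs <;> simp_all

theorem pv_spec_S (c : Char) (hd : pvDomChar c = true) :
    pvClassSpec c = some 'S' ↔ pvSpecials.contains c = true := by
  unfold pvClassSpec
  constructor
  · intro h; split_ifs at h <;> simp_all
  · intro h
    obtain ⟨h1, h2, h3⟩ := pv_specials_not_alnum c hd h
    have hm : c ∈ pvSpecials := by simpa using h
    simp [h1, h2, h3, hm]

-- the fold step of B's loop
def pvStep (s : PySem.Set Char) (c : Char) : PySem.Set Char :=
  match pvCharClass.get? c with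
  | some k => PySem.Set.add s k
  | none => s

theorem pv_mem_fold (l : List Char) (s : PySem.Set Char) (k : Char) :
    k ∈ l.foldl pvStep s ↔ k ∈ s ∨ ∃ c ∈ l, pvCharClass.get? c = some k := by
  induction l generalizing s with
  | nil => simp
  | cons c t ih =>
    rw [List.foldl_cons, ih]
    have hstep : k ∈ pvStep s c ↔ k ∈ s ∨ pvCharClass.get? c = some k := by
      unfold pvStep
      cases hc : pvCharClass.get? c with
      | none => simp
      | some k' => simp [PySem.Set.mem_add, eq_comm]
    rw [hstep]
    simp only [List.mem_cons]
    constructor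
    · rintro ((hs | hg) | ⟨d, hd, hg⟩)
      · exact Or.inl hs
      · exact Or.inr ⟨c, Or.inl rfl, hg⟩
      · exact Or.inr ⟨d, Or.inr hd, hg⟩
    · rintro (hs | ⟨d, rfl | hd, hg⟩)
      · exact Or.inl (Or.inl hs)
      · exact Or.inl (Or.inr hg)
      · exact Or.inr ⟨d, hd, hg⟩

theorem pv_nodup_fold (l : List Char) (s : PySem.Set Char) (h : s.Nodup) :
    (l.foldl pvStep s).Nodup := by
  induction l generalizing s with
  | nil => exact h
  | cons c t ih =>
    rw [List.foldl_cons]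
    apply ih
    unfold pvStep
    cases pvCharClass.get? c with
    | none => exact h
    | some k => exact PySem.Set.nodup_add _ _ h

theorem pv_sum_classes (s : List Char) (hn : s.Nodup)
    (hs : ∀ x ∈ s, x ∈ (['L', 'U', 'D', 'S'] : List Char)) :
    (s.map (fun k => pvClassSize.getD k 0)).sum =
      (if 'L' ∈ s then (26 : Int) else 0) + (if 'U' ∈ s then 26 else 0) +
      (if 'D' ∈ s then 10 else 0) + (if 'S' ∈ s then 32 else 0) := by
  induction s with
  | nil => simp
  | cons a t ih =>
    have hat : a ∉ t := (List.nodup_cons.mp hn).1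
    have htn : t.Nodup := (List.nodup_cons.mp hn).2
    have hts : ∀ x ∈ t, x ∈ (['L', 'U', 'D', 'S'] : List Char) :=
      fun x hx => hs x (List.mem_cons_of_mem a hx)
    have ha : a ∈ (['L', 'U', 'D', 'S'] : List Char) := hs a List.mem_cons_self
    rw [List.map_cons, List.sum_cons, ih htn hts]
    simp only [List.mem_cons, List.not_mem_nil, or_false] at ha
    rcases ha with rfl | rfl | rfl | rfl <;>
      simp [List.mem_cons, hat,
        show pvClassSize.getD 'L' 0 = 26 from rfl, show pvClassSize.getD 'U' 0 = 26 from rfl,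
        show pvClassSize.getD 'D' 0 = 10 from rfl, show pvClassSize.getD 'S' 0 = 32 from rfl] <;>
      ring

set_option maxRecDepth 8192 in
theorem get_charset_size_py_spec : Claim_equal_get_charset_size_py := by
  intro password hdom
  unfold Spec_get_charset_size_py get_charset_size_py get_charset_size_py_alt
  dsimp only
  have hdomc : ∀ c ∈ password.toList, pvDomChar c = true := by
    have := hdom
    unfold Dom_get_charset_size_py pvDomStr at this
    simpa [List.all_eq_true] using this
  have hfold : password.toList.foldl
      (fun (s : PySem.Set Char) c =>
        match pvCharClass.get? c with
        | some k => PySem.Set.add s k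
        | none => s) PySem.Set.empty = password.toList.foldl pvStep PySem.Set.empty := rfl
  rw [hfold]
  set F := password.toList.foldl pvStep PySem.Set.empty with hF
  have hnodup : F.Nodup := pv_nodup_fold _ _ (by simp [PySem.Set.empty])
  have hsub : ∀ x ∈ F, x ∈ (['L', 'U', 'D', 'S'] : List Char) := by
    intro x hx
    rw [hF, pv_mem_fold] at hx
    rcases hx with h | ⟨c, hc, hget⟩
    · simp [PySem.Set.empty] at h
    · rw [pv_table_spec c (hdomc c hc)] at hget
      unfold pvClassSpec at hget
      split_ifs at hget <;> (injection hget with h; subst h; simp)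
  rw [pv_sum_classes F hnodup hsub]
  have memIff : ∀ k : Char, (k ∈ F) ↔ ∃ c ∈ password.toList, pvCharClass.get? c = some k := by
    intro k; rw [hF, pv_mem_fold]; simp [PySem.Set.empty]
  have hL : ('L' ∈ F) ↔ password.toList.any (fun c => PySem.Chars.islower c) = true := by
    rw [memIff, List.any_eq_true]
    constructor
    · rintro ⟨c, hc, hget⟩
      exact ⟨c, hc, (pv_spec_L c).mp ((pv_table_spec c (hdomc c hc)) ▸ hget)⟩
    · rintro ⟨c, hc, hp⟩
      exact ⟨c, hc, (pv_table_spec c (hdomc c hc)).trans ((pv_spec_L c).mpr hp)⟩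
  have hU : ('U' ∈ F) ↔ password.toList.any (fun c => PySem.Chars.isupper c) = true := by
    rw [memIff, List.any_eq_true]
    constructor
    · rintro ⟨c, hc, hget⟩
      exact ⟨c, hc, (pv_spec_U c).mp ((pv_table_spec c (hdomc c hc)) ▸ hget)⟩
    · rintro ⟨c, hc, hp⟩
      exact ⟨c, hc, (pv_table_spec c (hdomc c hc)).trans ((pv_spec_U c).mpr hp)⟩
  have hD : ('D' ∈ F) ↔ password.toList.any (fun c => PySem.Chars.isdigit c) = true := by
    rw [memIff, List.any_eq_true]
    constructor
    · rintro ⟨c, hc, hget⟩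
      exact ⟨c, hc, (pv_spec_D c).mp ((pv_table_spec c (hdomc c hc)) ▸ hget)⟩
    · rintro ⟨c, hc, hp⟩
      exact ⟨c, hc, (pv_table_spec c (hdomc c hc)).trans ((pv_spec_D c).mpr hp)⟩
  have hS : ('S' ∈ F) ↔ password.toList.any (fun c => pvSpecials.contains c) = true := by
    rw [memIff, List.any_eq_true]
    constructor
    · rintro ⟨c, hc, hget⟩
      exact ⟨c, hc, (pv_spec_S c (hdomc c hc)).mp ((pv_table_spec c (hdomc c hc)) ▸ hget)⟩
    · rintro ⟨c, hc, hp⟩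
      exact ⟨c, hc, (pv_table_spec c (hdomc c hc)).trans ((pv_spec_S c (hdomc c hc)).mpr hp)⟩
  simp only [hL, hU, hD, hS]
  cases h1 : password.toList.any (fun c => PySem.Chars.islower c) <;>
  cases h2 : password.toList.any (fun c => PySem.Chars.isupper c) <;>
  cases h3 : password.toList.any (fun c => PySem.Chars.isdigit c) <;>
  cases h4 : password.toList.any (fun c => pvSpecials.contains c) <;>
    simp only [Bool.false_eq_true, if_true, if_false] <;> norm_num
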